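-- pv_equiv track=rewrite | github.com/hitbox/scratch | adventofcode/aoc2023/day06.py | solve_charge
-- ===== SOURCE A (Python) =====
-- def solve_charge(duration, record_distance):
--     minimum_charge = record_distance // duration
--     for speed in range(minimum_charge, duration):
--         distance = speed * (duration - speed)
--         if distance > record_distance:
--             yield speed
--             break
--     speed += 1
--     while True:
--         _speed = speed + 1
--         distance = _speed * (duration - _speed)
--         if distance <= record_distance:
--             break
--         speed = _speed
--     yield speed
-- ===== SOURCE B (Python) =====
-- def solve_charge(duration, record_distance):
--     # binary search for the smallest winning speed on the increasing half of the
--     # distance parabola; the largest winning speed follows by symmetry.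
--     peak = duration // 2
--     if peak * (duration - peak) <= record_distance:
--         raise ValueError("record cannot be beaten")
--     lo, hi = record_distance // duration, peak
--     # invariant: lo is not a winning speed, hi is
--     while hi - lo > 1:
--         mid = (lo + hi) // 2
--         if mid * (duration - mid) > record_distance:
--             hi = mid
--         else:
--             lo = mid
--     return [hi, duration - hi]
-- ===== Notes on version B (the rewrite author's own statement) =====
-- stated objective: faster
-- what changed: B replaces A's two linear scans (find the first winning speed, then climb one-by-one to the last) by a single binary search for the smallest winning speed on the increasing half of the parabola speed*(duration-speed), obtaining the largest winning speed by symmetry (duration - smallest).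
-- intended difference: When exactly one speed beats the record (duration even and record_distance = duration^2/4 - 1), A returns [duration/2, duration/2 + 1] because its second loop yields speed+1 without ever checking it, while B returns the intended [duration/2, duration/2]: duration/2 is the only winning speed. — e.g. on solve_charge(4, 3): A returns [2, 3], B returns [2, 2]
-- outside the precondition, e.g. on solve_charge(3, 2): A returns [3], B raises ValueError; on solve_charge(-3, 10): A returns [-3], B raises ValueError
import Mathlib
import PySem

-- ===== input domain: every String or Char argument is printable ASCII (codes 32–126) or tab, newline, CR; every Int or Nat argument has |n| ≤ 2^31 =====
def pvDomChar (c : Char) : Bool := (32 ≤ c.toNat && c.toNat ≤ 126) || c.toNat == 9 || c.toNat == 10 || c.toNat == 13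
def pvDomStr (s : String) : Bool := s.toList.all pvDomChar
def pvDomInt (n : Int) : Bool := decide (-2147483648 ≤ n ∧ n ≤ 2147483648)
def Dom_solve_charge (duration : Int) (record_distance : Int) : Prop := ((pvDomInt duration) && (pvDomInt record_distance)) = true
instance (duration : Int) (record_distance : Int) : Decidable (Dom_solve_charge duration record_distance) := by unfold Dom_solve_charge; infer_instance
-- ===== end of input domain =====

-- B replaces A's two linear scans by one binary search for the smallest winning
-- speed (the largest follows by symmetry of speed*(duration-speed)); equivalence is
-- proved on Pre_ outside D_ (see the one-line comments at Pre_ and D_ below).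

-- ===== PORT A =====
-- A's first loop: scan range(minimum_charge, duration) for the first winning speed.
def pvFindWin (duration record_distance : Int) : List Int → Option Int
  | [] => none
  | s :: rest =>
    if record_distance < s * (duration - s) then some s
    else pvFindWin duration record_distance rest

-- A's `while True` loop: keep accepting _speed = speed+1 while it beats the record.
-- Structural recursion on fuel; the fuel chosen by pvClimb dominates the loop length
-- (the loop body runs only while speed+1 < |duration| + |record| + 1).
def pvClimbF (duration record_distance : Int) : Nat → Int → Int
  | 0, t => t  -- never reached: fuel exceeds the number of iterations
  | n + 1, t =>
    if record_distance < (t + 1) * (duration - (t + 1)) then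
      pvClimbF duration record_distance n (t + 1)
    else t

def pvClimb (duration record_distance t : Int) : Int :=
  pvClimbF duration record_distance
    (duration.natAbs + record_distance.natAbs + t.natAbs + 2) t

-- Literal transliteration of A.  Where Python raises (duration = 0: ZeroDivisionError;
-- empty range: UnboundLocalError) the port returns [] — those inputs are outside Pre_.
def solve_charge (duration : Int) (record_distance : Int) : List Int :=
  let minimum_charge := PySem.Int.floordiv record_distance duration
  let rng := PySem.List.pyRange minimum_charge duration
  match pvFindWin duration record_distance rng with
  | some speed => [speed, pvClimb duration record_distance (speed + 1)]
  | none =>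
    match rng.getLast? with
    | some speed => [pvClimb duration record_distance (speed + 1)]  -- for-loop exhausted: only the second yield happens
    | none => []  -- Python: UnboundLocalError

-- ===== PORT B =====
-- B's `while hi - lo > 1` binary-search loop; fuel (hi-lo).toNat dominates it.
def pvBisectF (duration record_distance : Int) : Nat → Int → Int → Int
  | 0, _, hi => hi  -- never reached: the bracket shrinks by at least one per step
  | n + 1, lo, hi =>
    if hi - lo > 1 then
      let mid := PySem.Int.floordiv (lo + hi) 2
      if record_distance < mid * (duration - mid) then
        pvBisectF duration record_distance n lo mid
      else
        pvBisectF duration record_distance n mid hi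
    else hi

def pvBisect (duration record_distance lo hi : Int) : Int :=
  pvBisectF duration record_distance (hi - lo).toNat lo hi

-- Literal transliteration of B (Source B).  Where B raises ValueError (record unbeatable)
-- the port returns [] — those inputs are outside Pre_.
def solve_charge_alt (duration : Int) (record_distance : Int) : List Int :=
  let peak := PySem.Int.floordiv duration 2
  if peak * (duration - peak) ≤ record_distance then []  -- Python: raise ValueError
  else
    let h := pvBisect duration record_distance
      (PySem.Int.floordiv record_distance duration) peak
    [h, duration - h]

-- ===== PRECONDITION & SPEC =====
-- Pre_ excludes: duration ≤ 0 (A raises ZeroDivisionError / UnboundLocalError, or returns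
-- the accidental leftover [duration]); and record_distance not beaten by any speed, where A
-- either raises UnboundLocalError (empty range) or returns the accidental leftover
-- [duration] from dead loop state — B raises ValueError on all excluded inputs it reaches.
def Pre_solve_charge (duration : Int) (record_distance : Int) : Prop :=
  1 ≤ duration ∧ record_distance < (duration / 2) * (duration - duration / 2)
instance (duration : Int) (record_distance : Int) : Decidable (Pre_solve_charge duration record_distance) := by unfold Pre_solve_charge; infer_instance

def pvWitness_solve_charge : Int × Int := (7, 10)

-- D_: when exactly one speed wins (duration even, record_distance = duration²/4 - 1),
-- A returns [d/2, d/2+1] — its second loop yields d/2+1 without ever checking it — while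
-- B returns the intended [d/2, d/2]: the largest winning speed really is d/2.
def D_solve_charge (duration : Int) (record_distance : Int) : Prop :=
  record_distance * 4 = duration * duration - 4
instance (duration : Int) (record_distance : Int) : Decidable (D_solve_charge duration record_distance) := by unfold D_solve_charge; infer_instance

def Spec_solve_charge (duration : Int) (record_distance : Int) (out : List Int) : Prop := ¬ D_solve_charge duration record_distance → out = solve_charge_alt duration record_distance
instance (duration : Int) (record_distance : Int) (out : List Int) : Decidable (Spec_solve_charge duration record_distance out) := by unfold Spec_solve_charge; infer_instance

def pvDiffWitness_solve_charge : Int × Int := (4, 3)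
def pvDiffWitnessOut_solve_charge : (List Int) × (List Int) := ([2, 3], [2, 2])

-- ===== CLAIM (what is proved, stated in full; the proofs are below) =====
def Claim_unchanged_solve_charge : Prop := ∀ (duration : Int) (record_distance : Int), Dom_solve_charge duration record_distance → Pre_solve_charge duration record_distance → Spec_solve_charge duration record_distance (solve_charge duration record_distance)
def Claim_changed_solve_charge : Prop := Dom_solve_charge (pvDiffWitness_solve_charge.1) (pvDiffWitness_solve_charge.2) ∧ Pre_solve_charge (pvDiffWitness_solve_charge.1) (pvDiffWitness_solve_charge.2) ∧ D_solve_charge (pvDiffWitness_solve_charge.1) (pvDiffWitness_solve_charge.2) ∧ solve_charge (pvDiffWitness_solve_charge.1) (pvDiffWitness_solve_charge.2) = pvDiffWitnessOut_solve_charge.1 ∧ solve_charge_alt (pvDiffWitness_solve_charge.1) (pvDiffWitness_solve_charge.2) = pvDiffWitnessOut_solve_charge.2 ∧ pvDiffWitnessOut_solve_charge.1 ≠ pvDiffWitnessOut_solve_charge.2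
def Claim_exact_solve_charge : Prop := ∀ (duration : Int) (record_distance : Int), Dom_solve_charge duration record_distance → Pre_solve_charge duration record_distance → D_solve_charge duration record_distance → solve_charge duration record_distance ≠ solve_charge_alt duration record_distance

-- ===== LEMMAS AND PROOFS =====

-- Concavity of s ↦ s*(d-s): winners form an interval.
lemma pv_between {d r a b c : Int} (hac : a ≤ c) (hcb : c ≤ b)
    (ha : r < a * (d - a)) (hb : r < b * (d - b)) : r < c * (d - c) := by
  by_cases h : a + c ≤ d
  · nlinarith
  · nlinarith

-- Binary search returns the least winning speed in (lo, hi].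
lemma pvBisectF_spec (d r : Int) :
    ∀ (n : Nat) (lo hi : Int), (hi - lo).toNat ≤ n →
      ¬ r < lo * (d - lo) → r < hi * (d - hi) → lo < hi →
      (r < (pvBisectF d r n lo hi) * (d - pvBisectF d r n lo hi)) ∧
      ¬ r < (pvBisectF d r n lo hi - 1) * (d - (pvBisectF d r n lo hi - 1)) ∧
      lo < pvBisectF d r n lo hi ∧ pvBisectF d r n lo hi ≤ hi := by
  intro n
  induction n with
  | zero => intro lo hi hn _ _ hlt; omega
  | succ n ih =>
    intro lo hi hn hlo hhi hlt
    simp only [pvBisectF]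
    by_cases hg : hi - lo > 1
    · rw [if_pos hg]
      have hm1 : lo + 1 ≤ PySem.Int.floordiv (lo + hi) 2 :=
        (PySem.Int.le_floordiv_iff_mul_le (by norm_num)).mpr (by omega)
      have hm2 : PySem.Int.floordiv (lo + hi) 2 < hi :=
        (PySem.Int.floordiv_lt_iff_lt_mul (by norm_num)).mpr (by omega)
      by_cases hp : r < (PySem.Int.floordiv (lo + hi) 2) * (d - PySem.Int.floordiv (lo + hi) 2)
      · rw [if_pos hp]
        have h := ih lo (PySem.Int.floordiv (lo + hi) 2) (by omega) hlo hp (by omega)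
        exact ⟨h.1, h.2.1, h.2.2.1, le_trans h.2.2.2 (le_of_lt hm2)⟩
      · rw [if_neg hp]
        have h := ih (PySem.Int.floordiv (lo + hi) 2) hi (by omega) hp hhi (by omega)
        exact ⟨h.1, h.2.1, lt_of_le_of_lt (by omega) h.2.2.1, h.2.2.2⟩
    · rw [if_neg hg]
      have : hi = lo + 1 := by omega
      refine ⟨hhi, ?_, by omega, le_refl _⟩
      rw [this]; simpa using hlo

-- A's first loop finds the least winning speed h when it lies in [a, b).
lemma pvFindWin_range (d r b h : Int) (hhb : h < b) (hPh : r < h * (d - h)) :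
    ∀ (n : Nat) (a : Int), (h - a).toNat ≤ n → a ≤ h →
      (∀ s, a ≤ s → s < h → ¬ r < s * (d - s)) →
      pvFindWin d r (PySem.List.pyRange a b) = some h := by
  intro n
  induction n with
  | zero =>
    intro a hn hah _
    have hae : a = h := by omega
    subst hae
    rw [PySem.List.pyRange_one_cons (by omega)]
    simp only [pvFindWin, if_pos hPh]
  | succ n ih =>
    intro a hn hah hmin
    rw [PySem.List.pyRange_one_cons (by omega)]
    simp only [pvFindWin]
    rcases eq_or_lt_of_le hah with hae | hal
    · subst hae; rw [if_pos hPh]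
    · rw [if_neg (hmin a (le_refl a) hal)]
      exact ih (a + 1) (by omega) (by omega) (fun s hs => hmin s (by omega))

-- A's while-loop climbs from t to e when every speed in (t, e] wins and e+1 does not.
lemma pvClimbF_spec (d r : Int) :
    ∀ (n : Nat) (t e : Int), (e - t).toNat < n → t ≤ e →
      (∀ s, t < s → s ≤ e → r < s * (d - s)) →
      ¬ r < (e + 1) * (d - (e + 1)) →
      pvClimbF d r n t = e := by
  intro n
  induction n with
  | zero => intro t e hn hte _ _; omega
  | succ n ih =>
    intro t e hn hte hall hstop
    simp only [pvClimbF]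
    rcases eq_or_lt_of_le hte with hteq | hlt
    · subst hteq; rw [if_neg hstop]
    · rw [if_pos (hall (t + 1) (by omega) (by omega))]
      exact ih (t + 1) e (by omega) (by omega) (fun s hs => hall s (by omega)) hstop

-- Main analysis: under Pre_, with h the least winning speed found by B's search,
-- A returns [h, pvClimb … (h+1)] and B returns [h, duration - h].
lemma pv_main (d r : Int) (hd : 1 ≤ d)
    (hpk : r < (d / 2) * (d - d / 2)) :
    ∃ h : Int,
      solve_charge_alt d r = [h, d - h] ∧
      solve_charge d r = [h, pvClimb d r (h + 1)] ∧
      r < h * (d - h) ∧ ¬ r < (h - 1) * (d - (h - 1)) ∧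
      PySem.Int.floordiv r d < h ∧ 2 * h ≤ d := by
  have h2 : (0:Int) < 2 := by norm_num
  have hpeak : PySem.Int.floordiv d 2 = d / 2 := PySem.Int.floordiv_eq_ediv_of_pos h2
  set lo0 := PySem.Int.floordiv r d with hlo0
  -- the start of the range never wins
  have hnlo0 : ¬ r < lo0 * (d - lo0) := by
    intro hP
    have h1 : r < lo0 * d := by nlinarith [mul_self_nonneg lo0]
    have := (PySem.Int.floordiv_lt_iff_lt_mul (a := r) (b := d) (q := lo0) (by omega)).mpr h1
    omega
  -- the peak wins, and lies above lo0
  have hppk : r < (d / 2) * (d - d / 2) := hpk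
  have hlop : lo0 < d / 2 := by
    have h1 : r < (d / 2) * d := by nlinarith [mul_self_nonneg (d / 2)]
    have := (PySem.Int.floordiv_lt_iff_lt_mul (a := r) (b := d) (q := d / 2) (by omega)).mpr h1
    omega
  set h := pvBisect d r lo0 (d / 2) with hh
  have hspec := pvBisectF_spec d r ((d / 2 - lo0).toNat) lo0 (d / 2) (le_refl _) hnlo0 hppk hlop
  have hub : pvBisect d r lo0 (d / 2) = pvBisectF d r ((d / 2 - lo0).toNat) lo0 (d / 2) := rfl
  rw [← hub, ← hh] at hspec
  obtain ⟨hPh, hPh1, hloh, hhpk'⟩ := hspec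
  have hd2 : 2 * (d / 2) ≤ d := by omega
  refine ⟨h, ?_, ?_, hPh, hPh1, hloh, by omega⟩
  · -- B's value
    show (if (PySem.Int.floordiv d 2) * (d - PySem.Int.floordiv d 2) ≤ r then ([] : List Int)
          else [pvBisect d r (PySem.Int.floordiv r d) (PySem.Int.floordiv d 2),
                d - pvBisect d r (PySem.Int.floordiv r d) (PySem.Int.floordiv d 2)]) = [h, d - h]
    rw [hpeak, ← hlo0, ← hh]
    rw [if_neg (by omega : ¬ (d / 2) * (d - d / 2) ≤ r)]
  · -- A's value
    have hfind : pvFindWin d r (PySem.List.pyRange lo0 d) = some h := by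
      apply pvFindWin_range d r d h (by omega) hPh ((h - lo0).toNat) lo0 (le_refl _) (by omega)
      intro s hs1 hs2 hPs
      exact hPh1 (pv_between (a := s) (b := h) (by omega) (by omega) hPs hPh)
    show (match pvFindWin d r (PySem.List.pyRange (PySem.Int.floordiv r d) d) with
          | some speed => [speed, pvClimb d r (speed + 1)]
          | none =>
            match (PySem.List.pyRange (PySem.Int.floordiv r d) d).getLast? with
            | some speed => [pvClimb d r (speed + 1)]
            | none => ([] : List Int)) = [h, pvClimb d r (h + 1)]
    rw [← hlo0, hfind]

-- fuel bound for pvClimb in the situation of pv_main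
lemma pvClimb_eval (d r h : Int) (hd : 1 ≤ d)
    (hlo : PySem.Int.floordiv r d < h)
    (e : Int) (hte : h + 1 ≤ e) (hed : e ≤ d - h + 1)
    (hall : ∀ s, h + 1 < s → s ≤ e → r < s * (d - s))
    (hstop : ¬ r < (e + 1) * (d - (e + 1))) :
    pvClimb d r (h + 1) = e := by
  unfold pvClimb
  apply pvClimbF_spec d r _ (h + 1) e _ hte hall hstop
  -- fuel sufficiency: e - (h+1) < |d| + |r| + |h+1| + 2
  have hrlo : -(r.natAbs : Int) ≤ PySem.Int.floordiv r d := by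
    have e1 : -(r.natAbs : Int) ≤ r := by omega
    have e2 : (0:Int) ≤ (r.natAbs : Int) := by omega
    have h1 : -(r.natAbs : Int) * d ≤ r := by nlinarith
    exact (PySem.Int.le_floordiv_iff_mul_le (by omega)).mpr h1
  omega

lemma pv_abc (d r : Int) (hd : 1 ≤ d) (hpk : r < (d / 2) * (d - d / 2)) :
    (¬ D_solve_charge d r → solve_charge d r = solve_charge_alt d r) ∧
    (D_solve_charge d r → solve_charge d r ≠ solve_charge_alt d r) := by
  obtain ⟨h, hB, hA, hPh, hPh1, hloh, hh2⟩ := pv_main d r hd hpk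
  have hsymeq : (d - h) * (d - (d - h)) = h * (d - h) := by ring
  have hsym : r < (d - h) * (d - (d - h)) := by rw [hsymeq]; exact hPh
  have hsymeq1 : (d - h + 1) * (d - (d - h + 1)) = (h - 1) * (d - (h - 1)) := by ring
  have hsym1 : ¬ r < (d - h + 1) * (d - (d - h + 1)) := by rw [hsymeq1]; exact hPh1
  constructor
  · intro hnD
    have hne : 2 * h ≠ d := by
      intro he
      apply hnD
      unfold D_solve_charge
      have hub : (h - 1) * (d - (h - 1)) ≤ r := not_lt.mp hPh1
      have h1 : r + 1 ≤ h * (d - h) := Int.lt_iff_add_one_le.mp hPh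
      have h4 : d * d = 4 * (h * (d - h)) := by rw [← he]; ring
      have h5 : (h - 1) * (d - (h - 1)) = h * (d - h) - 1 := by rw [← he]; ring
      linarith
    have hclimb : pvClimb d r (h + 1) = d - h := by
      apply pvClimb_eval d r h hd hloh (d - h) (by omega) (by omega) _ hsym1
      intro s hs1 hs2
      exact pv_between (a := h) (b := d - h) (by omega) (by omega) hPh hsym
    rw [hA, hB, hclimb]
  · intro hD
    unfold D_solve_charge at hD
    have he : 2 * h = d := by
      have hk2 : (d - 2 * h) * (d - 2 * h) < 4 := by nlinarith
      have hk1 : d - 2 * h ≤ 1 := by nlinarith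
      rcases (by omega : d - 2 * h = 0 ∨ d - 2 * h = 1) with hk | hk
      · omega
      · exfalso
        have hd1 : d = 2 * h + 1 := by omega
        have hsq : r * 4 = 4 * (h * h) + 4 * h - 3 := by rw [hd1] at hD; linarith [hD, (by ring : (2*h+1) * (2*h+1) = 4 * (h*h) + 4*h + 1)]
        generalize h * h = x at hsq
        omega
    have hstop2 : ¬ r < (h + 1 + 1) * (d - (h + 1 + 1)) := by
      intro hc; nlinarith
    have hclimb : pvClimb d r (h + 1) = h + 1 := by
      apply pvClimb_eval d r h hd hloh (h + 1) (le_refl _) (by omega) _ hstop2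
      intro s hs1 hs2; omega
    rw [hA, hB, hclimb]
    intro hcon
    simp only [List.cons.injEq, and_true] at hcon
    omega

-- ===== VERDICT (by name: the statement is the Claim_ definition above) =====
theorem solve_charge_spec : Claim_unchanged_solve_charge := by
  intro d r _ hpre hnD
  exact (pv_abc d r hpre.1 hpre.2).1 hnD

theorem solve_charge_changed : Claim_changed_solve_charge := by
  unfold Claim_changed_solve_charge; decide

theorem solve_charge_tight : Claim_exact_solve_charge := by
  intro d r _ hpre hD
  exact (pv_abc d r hpre.1 hpre.2).2 hD
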